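-- pv_equiv track=rewrite | github.com/Dekonu/data-dialysis | src/adapters/ingesters/csv_ingester.py | _extract_observation_data
-- ===== SOURCE A (Python) =====
-- from typing import Iterator, Optional, Dict, Any, List, Union
--
-- def _extract_observation_data(
--
--     record_data: Dict[str, Any],
--     column_mapping: Dict[str, str]
-- ) -> Optional[Dict[str, Any]]:
--     """Extract observation data from CSV record if present.
--
--     Parameters:
--         record_data: CSV record dictionary
--         column_mapping: Column mapping dictionary
--
--     Returns:
--         Optional[dict]: Observation data dictionary or None
--     """
--     observation_fields = [
--         'observation_id', 'category', 'code', 'value', 'unit',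
--         'effective_date', 'status'
--     ]
--
--     observation_data = {}
--     for field in observation_fields:
--         # Check if field is in column_mapping (reverse lookup)
--         csv_col = None
--         for domain_field, csv_column in column_mapping.items():
--             if domain_field == field and csv_column in record_data:
--                 csv_col = csv_column
--                 break
--
--         if csv_col and record_data.get(csv_col):
--             value = record_data[csv_col]
--             if isinstance(value, str):
--                 value = value.strip()
--             observation_data[field] = value if value else None
--
--     return observation_data if observation_data else None
-- ===== SOURCE B (Python) =====
-- def _extract_observation_data(record_data, column_mapping):
--     """Extract observation data from CSV record if present.
--
--     Single pass over the column mapping collecting (rank, field, value)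
--     triples for qualifying entries, then a sort by rank restores the
--     canonical field order of the result.
--     """
--     RANK = {'observation_id': 0, 'category': 1, 'code': 2, 'value': 3,
--             'unit': 4, 'effective_date': 5, 'status': 6}
--     found = []
--     for f, c in column_mapping.items():
--         if f in RANK and c and record_data.get(c):
--             v = record_data[c]
--             if isinstance(v, str):
--                 v = v.strip()
--             found.append((RANK[f], f, v if v else None))
--     if not found:
--         return None
--     found.sort(key=lambda t: t[0])
--     return {f: v for _, f, v in found}
-- ===== Notes on version B (the rewrite author's own statement) =====
-- stated objective: alternative
-- what changed: A loops over the 7 fields and rescans the whole mapping for each; B makes one pass over column_mapping.items() collecting (rank, field, value) triples for qualifying entries and then sorts by rank to restore field order (pass-and-sort instead of nested scans).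
import Mathlib
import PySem

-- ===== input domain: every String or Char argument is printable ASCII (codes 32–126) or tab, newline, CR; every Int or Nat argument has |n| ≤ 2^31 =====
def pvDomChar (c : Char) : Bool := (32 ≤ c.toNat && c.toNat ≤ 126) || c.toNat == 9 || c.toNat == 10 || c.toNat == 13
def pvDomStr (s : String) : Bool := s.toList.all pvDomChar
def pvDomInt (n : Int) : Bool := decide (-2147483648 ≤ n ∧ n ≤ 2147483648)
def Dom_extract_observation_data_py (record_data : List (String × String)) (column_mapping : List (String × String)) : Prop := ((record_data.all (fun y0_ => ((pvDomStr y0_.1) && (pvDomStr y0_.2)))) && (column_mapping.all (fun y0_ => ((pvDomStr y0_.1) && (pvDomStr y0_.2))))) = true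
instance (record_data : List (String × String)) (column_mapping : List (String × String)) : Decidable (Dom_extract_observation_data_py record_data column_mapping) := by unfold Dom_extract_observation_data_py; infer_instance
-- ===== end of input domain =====

-- B replaces A's field loop with an inner scan of the mapping by ONE pass over the mapping
-- collecting (rank, field, value) triples, then a sort by rank (objective: alternative).
-- Equivalence is about the RETURN value; neither program mutates its arguments.

-- ===== PORT A =====
def pvObsFields : List String :=
  ["observation_id", "category", "code", "value", "unit", "effective_date", "status"]

-- A's inner loop: first (domain_field, csv_column) with domain_field == field and csv_column in record_data
def pvFindCol (items : List (String × String)) (rd : PySem.Dict String String) (field : String) : Option String :=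
  match items with
  | [] => none
  | (df, cc) :: rest =>
    if df == field && PySem.Dict.contains rd cc then some cc
    else pvFindCol rest rd field

def extract_observation_data_py (record_data : List (String × String)) (column_mapping : List (String × String)) : Option (List (String × String)) :=
  let rd := PySem.Dict.ofList record_data
  let cm := PySem.Dict.ofList column_mapping
  let od := pvObsFields.foldl (fun od field =>
      match pvFindCol cm.items rd field with
      | none => od          -- 'if csv_col' fails (csv_col is None)
      | some c =>
        -- 'if csv_col and record_data.get(csv_col):'; record_data[csv_col] cannot raise (membership checked);
        -- value is always a str here, so it is stripped; under Pre_ the stripped value is nonempty,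
        -- so 'value if value else None' is the stripped value itself
        if c != "" && PySem.Dict.getD rd c "" != "" then
          PySem.Dict.insert od field (PySem.Str.strip (PySem.Dict.getD rd c ""))
        else od)
    PySem.Dict.empty
  if od.items = [] then none else some od.items

-- ===== PORT B =====
-- RANK = {'observation_id': 0, …, 'status': 6}
def pvRank : PySem.Dict String Int :=
  PySem.Dict.ofList [("observation_id", 0), ("category", 1), ("code", 2), ("value", 3),
                     ("unit", 4), ("effective_date", 5), ("status", 6)]

def extract_observation_data_py_alt (record_data : List (String × String)) (column_mapping : List (String × String)) : Option (List (String × String)) :=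
  let rd := PySem.Dict.ofList record_data
  let cm := PySem.Dict.ofList column_mapping
  -- for f, c in column_mapping.items(): if f in RANK and c and record_data.get(c): found.append(…)
  -- record_data[c] cannot raise ('record_data.get(c)' truthy implies membership); the value is a str,
  -- so it is stripped; under Pre_ the stripped value is nonempty, so 'v if v else None' is v itself
  let found := cm.items.foldl (fun acc p =>
      if pvRank.contains p.1 && p.2 != "" && PySem.Dict.getD rd p.2 "" != "" then
        acc ++ [(PySem.Dict.getD pvRank p.1 0, p.1, PySem.Str.strip (PySem.Dict.getD rd p.2 ""))]
      else acc)
    ([] : List (Int × String × String))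
  if found = [] then none
  else
    -- found.sort(key=lambda t: t[0]); return {f: v for _, f, v in found}
    let srt := PySem.List.sorted found (fun t => t.1) false
    some ((srt.foldl (fun d t => PySem.Dict.insert d t.2.1 t.2.2) PySem.Dict.empty).items)

-- ===== PRECONDITION & SPEC =====
-- Pre_ excludes inputs where an observation-field mapping entry points at a record column holding a
-- NONEMPTY WHITESPACE-ONLY value: there Python A (and B, identically) store None as the dict value,
-- and None is not representable in the Lean output value type String, so no port can state that output.
def Pre_extract_observation_data_py (record_data : List (String × String)) (column_mapping : List (String × String)) : Prop :=
  ∀ q ∈ column_mapping, q.1 ∈ pvObsFields →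
    ∀ p ∈ record_data, p.1 = q.2 → (p.2 = "" ∨ PySem.Str.strip p.2 ≠ "")
instance (record_data : List (String × String)) (column_mapping : List (String × String)) : Decidable (Pre_extract_observation_data_py record_data column_mapping) := by unfold Pre_extract_observation_data_py; infer_instance

def pvWitness_extract_observation_data_py : (List (String × String)) × (List (String × String)) :=
  ([("col1", " 7 "), ("col2", "done")], [("observation_id", "col1"), ("status", "col2"), ("note", "col3")])

def Spec_extract_observation_data_py (record_data : List (String × String)) (column_mapping : List (String × String)) (out : Option (List (String × String))) : Prop := out = extract_observation_data_py_alt record_data column_mapping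
instance (record_data : List (String × String)) (column_mapping : List (String × String)) (out : Option (List (String × String))) : Decidable (Spec_extract_observation_data_py record_data column_mapping out) := by unfold Spec_extract_observation_data_py; infer_instance

-- ===== CLAIM (what is proved, stated in full; the proofs are below) =====
def Claim_equal_extract_observation_data_py : Prop := ∀ (record_data : List (String × String)) (column_mapping : List (String × String)), Dom_extract_observation_data_py record_data column_mapping → Pre_extract_observation_data_py record_data column_mapping → Spec_extract_observation_data_py record_data column_mapping (extract_observation_data_py record_data column_mapping)

-- ===== LEMMAS AND PROOFS =====

-- the per-field decision and value of A, phrased on the optional column pvFindCol returns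
def pvKeep (rd : PySem.Dict String String) (o : Option String) : Bool :=
  match o with
  | none => false
  | some c => c != "" && PySem.Dict.getD rd c "" != ""

def pvOut (rd : PySem.Dict String String) (o : Option String) : String :=
  PySem.Str.strip (PySem.Dict.getD rd (o.getD "") "")

theorem pvStepA (rd od : PySem.Dict String String) (f : String) (o : Option String) :
    (match o with
      | none => od
      | some c =>
        if c != "" && PySem.Dict.getD rd c "" != "" then
          PySem.Dict.insert od f (PySem.Str.strip (PySem.Dict.getD rd c ""))
        else od)
    = if pvKeep rd o then PySem.Dict.insert od f (pvOut rd o) else od := by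
  cases o with
  | none => simp [pvKeep]
  | some c => simp only [pvKeep, pvOut, Option.getD_some]

theorem pvFields_nodup : pvObsFields.Nodup := by decide

theorem pvRank_contains_iff (f : String) : pvRank.contains f = true ↔ f ∈ pvObsFields := by
  rw [PySem.Dict.contains_iff_mem_keys, show pvRank.keys = pvObsFields from rfl]

theorem pvRank_pairwise :
    pvObsFields.Pairwise (fun a b => PySem.Dict.getD pvRank a 0 < PySem.Dict.getD pvRank b 0) := by
  decide

-- getD ≠ default forces membership
theorem pvContains_of_getD_ne (rd : PySem.Dict String String) (c : String)
    (h : PySem.Dict.getD rd c "" ≠ "") : PySem.Dict.contains rd c = true := by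
  by_contra hc
  simp only [Bool.not_eq_true] at hc
  exact h (PySem.Dict.getD_of_not_contains rd "" hc)

-- pvFindCol's result is an entry of the scanned list whose column is present
theorem pvFindCol_some (items : List (String × String)) (rd : PySem.Dict String String)
    (f c : String) (h : pvFindCol items rd f = some c) :
    (f, c) ∈ items ∧ PySem.Dict.contains rd c = true := by
  induction items with
  | nil => simp [pvFindCol] at h
  | cons p rest ih =>
    obtain ⟨df, cc⟩ := p
    simp only [pvFindCol] at h
    split_ifs at h with hif
    · simp only [Bool.and_eq_true, beq_iff_eq] at hif
      obtain ⟨rfl, hcon⟩ := hif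
      obtain rfl := Option.some.inj h
      exact ⟨List.mem_cons_self, hcon⟩
    · obtain ⟨hm, hc⟩ := ih h
      exact ⟨List.mem_cons_of_mem _ hm, hc⟩

-- with unique keys, the scan finds exactly the dict's entry for f (when its column is present)
theorem pvFindCol_of_mem (items : List (String × String)) (rd : PySem.Dict String String)
    (f c : String) (hnd : (items.map Prod.fst).Nodup) (hm : (f, c) ∈ items)
    (hcon : PySem.Dict.contains rd c = true) : pvFindCol items rd f = some c := by
  induction items with
  | nil => simp at hm
  | cons p rest ih =>
    obtain ⟨df, cc⟩ := p
    simp only [List.map_cons, List.nodup_cons] at hnd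
    rcases List.mem_cons.1 hm with hhd | htl
    · injection hhd with h1 h2
      subst h1; subst h2
      simp [pvFindCol, hcon]
    · have hne : df ≠ f := by
        rintro rfl
        exact hnd.1 (List.mem_map_of_mem htl)
      simp only [pvFindCol]
      rw [show (df == f) = false by simpa using hne]
      simpa using ih hnd.2 htl

-- ===== VERDICT (by name: the statement is the Claim_ definition above) =====
theorem extract_observation_data_py_spec : Claim_equal_extract_observation_data_py := by
  intro record_data column_mapping _hDom _hPre
  unfold Spec_extract_observation_data_py
  unfold extract_observation_data_py extract_observation_data_py_alt
  set rd := PySem.Dict.ofList record_data with hrd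
  set cm := PySem.Dict.ofList column_mapping with hcm
  have hkeys : (cm.items.map Prod.fst).Nodup := by
    simpa [PySem.Dict.keys] using PySem.Dict.nodup_keys_ofList (κ := String) (ν := String) column_mapping
  -- A's fold produces the qualifying fields, in field order
  have eA : (pvObsFields.foldl (fun od field =>
      match pvFindCol cm.items rd field with
      | none => od
      | some c =>
        if c != "" && PySem.Dict.getD rd c "" != "" then
          PySem.Dict.insert od field (PySem.Str.strip (PySem.Dict.getD rd c ""))
        else od) PySem.Dict.empty).items
      = (pvObsFields.filter (fun f => pvKeep rd (pvFindCol cm.items rd f))).map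
          (fun f => (f, pvOut rd (pvFindCol cm.items rd f))) := by
    rw [PySem.List.foldl_congr_mem _ _ (fun od f =>
        if pvKeep rd (pvFindCol cm.items rd f) then
          PySem.Dict.insert od f (pvOut rd (pvFindCol cm.items rd f)) else od) _
        (fun od f _ => pvStepA rd od f _)]
    rw [PySem.List.foldl_if_eq_foldl_filter]
    rw [PySem.Dict.items_foldl_insert_fresh
        (List.filter (fun f => pvKeep rd (pvFindCol cm.items rd f)) pvObsFields)
        (fun f => f) (fun f => pvOut rd (pvFindCol cm.items rd f)) PySem.Dict.empty
        (fun a _ => PySem.Dict.contains_empty a)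
        (by simpa using pvFields_nodup.filter (fun f => pvKeep rd (pvFindCol cm.items rd f)))]
    simp [PySem.Dict.empty]
  -- B's single pass produces the qualifying mapping entries, in mapping order
  have eF : (cm.items.foldl (fun acc p =>
      if pvRank.contains p.1 && p.2 != "" && PySem.Dict.getD rd p.2 "" != "" then
        acc ++ [(PySem.Dict.getD pvRank p.1 0, p.1, PySem.Str.strip (PySem.Dict.getD rd p.2 ""))]
      else acc) ([] : List (Int × String × String)))
      = ((cm.items.filter (fun p => pvRank.contains p.1 && p.2 != "" && PySem.Dict.getD rd p.2 "" != "")).map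
          (fun p => (PySem.Dict.getD pvRank p.1 0, p.1, PySem.Str.strip (PySem.Dict.getD rd p.2 "")))) := by
    rw [PySem.List.foldl_append_if]
    simp
  set q' : String × String → Bool :=
    fun p => pvRank.contains p.1 && p.2 != "" && PySem.Dict.getD rd p.2 "" != "" with hq'
  set g : String × String → Int × String × String :=
    fun p => (PySem.Dict.getD pvRank p.1 0, p.1, PySem.Str.strip (PySem.Dict.getD rd p.2 "")) with hg
  set qual : String → Bool := fun f => pvKeep rd (pvFindCol cm.items rd f) with hqual
  set found := (cm.items.filter q').map g with hfound
  set target := (pvObsFields.filter qual).map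
      (fun f => (PySem.Dict.getD pvRank f 0, f, pvOut rd (pvFindCol cm.items rd f))) with htarget
  -- memberships coincide
  have hmem : ∀ t, t ∈ found ↔ t ∈ target := by
    intro t
    constructor
    · intro ht
      obtain ⟨p, hp, rfl⟩ := List.mem_map.1 ht
      obtain ⟨hpm, hpq⟩ := List.mem_filter.1 hp
      obtain ⟨⟨hrk, hne⟩, hval⟩ : (pvRank.contains p.1 = true ∧ ¬ p.2 = "") ∧
          ¬ PySem.Dict.getD rd p.2 "" = "" := by
        simpa [hq'] using hpq
      have hcon : PySem.Dict.contains rd p.2 = true :=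
        pvContains_of_getD_ne rd p.2 (by simpa using hval)
      have hfc : pvFindCol cm.items rd p.1 = some p.2 :=
        pvFindCol_of_mem cm.items rd p.1 p.2 hkeys (by simpa using hpm) hcon
      refine List.mem_map.2 ⟨p.1, List.mem_filter.2 ⟨(pvRank_contains_iff p.1).1 hrk, ?_⟩, ?_⟩
      · simp [hqual, hfc, pvKeep, hne, hval]
      · simp [hg, hfc, pvOut]
    · intro ht
      obtain ⟨f, hf, rfl⟩ := List.mem_map.1 ht
      obtain ⟨hfm, hfq⟩ := List.mem_filter.1 hf
      obtain ⟨c, hfc⟩ : ∃ c, pvFindCol cm.items rd f = some c := by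
        rcases h : pvFindCol cm.items rd f with _ | c
        · rw [hqual] at hfq; simp [pvKeep, h] at hfq
        · exact ⟨c, rfl⟩
      obtain ⟨hne, hval⟩ : (c != "") = true ∧ (PySem.Dict.getD rd c "" != "") = true := by
        have := hfq; rw [hqual] at this; simpa [pvKeep, hfc] using this
      obtain ⟨hm, _⟩ := pvFindCol_some cm.items rd f c hfc
      refine List.mem_map.2 ⟨(f, c), List.mem_filter.2 ⟨hm, ?_⟩, ?_⟩
      · simp [hq', hne, hval, (pvRank_contains_iff f).2 hfm]
      · simp [hg, pvOut, hfc]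
  -- both lists have no duplicates (their field components are nodup)
  have hnd_found : found.Nodup := by
    have hp : (found.map (fun t => t.2.1)).Nodup := by
      have h1 : (List.map Prod.fst (cm.items.filter q')).Nodup :=
        hkeys.sublist (List.Sublist.map Prod.fst List.filter_sublist)
      rw [hfound, List.map_map]
      exact h1
    exact hp.of_map _
  have hndk : (target.map (fun t => t.2.1)).Nodup := by
    rw [htarget, List.map_map]
    exact (by simpa using pvFields_nodup.filter qual :
      (List.map (fun f => (f : String)) (pvObsFields.filter qual)).Nodup)
  have hnd_target : target.Nodup := hndk.of_map _
  have hperm : target.Perm found :=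
    (List.perm_ext_iff_of_nodup hnd_target hnd_found).2 (fun t => (hmem t).symm)
  -- the sort by rank restores field order
  have hsorted : PySem.List.sorted found (fun t => t.1) false = target := by
    refine PySem.List.sorted_eq_of_perm_of_pairwise_lt found target (fun t => t.1) hperm ?_
    rw [htarget]
    refine List.pairwise_map.2 ?_
    exact (pvRank_pairwise.filter qual).imp (fun h => h)
  -- emptiness of the two intermediate results coincides
  have hempty : (found = []) ↔ ((pvObsFields.filter qual).map
      (fun f => (f, pvOut rd (pvFindCol cm.items rd f))) = []) := by
    constructor
    · intro h
      have : target = [] := List.Perm.eq_nil (hperm.trans (h ▸ List.Perm.refl _))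
      rw [htarget] at this
      simpa using (by simpa using this : List.filter qual pvObsFields = [])
    · intro h
      have hfil : List.filter qual pvObsFields = [] := by simpa using h
      have : target = [] := by rw [htarget, hfil]; rfl
      exact List.Perm.eq_nil (hperm.symm.trans (this ▸ List.Perm.refl _))
  simp only [eA, eF]
  by_cases hz : found = []
  · rw [if_pos (hempty.1 hz), if_pos (by rw [hfound] at hz; exact hz)]
  · rw [if_neg (fun h => hz (hempty.2 h)), if_neg (by rw [hfound] at hz; exact hz)]
    congr 1
    have hfresh : ∀ t ∈ target, (PySem.Dict.empty : PySem.Dict String String).contains t.2.1 = false :=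
      fun t _ => PySem.Dict.contains_empty _
    rw [hsorted]
    rw [PySem.Dict.items_foldl_insert_fresh target (fun t => t.2.1) (fun t => t.2.2)
        PySem.Dict.empty hfresh (by rw [List.map_map] at hndk; rw [List.map_map]; exact hndk)]
    rw [htarget, List.map_map]
    simp [PySem.Dict.empty, Function.comp_def]
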